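-- pv_equiv track=rewrite | github.com/alexitosrv/at | exe/D___.py | find_candidates
-- ===== SOURCE A (Python) =====
-- def find_candidates(s, t, m):
-- 	k = 0
-- 	still_looking = True
-- 	while still_looking:
-- 		k = s.find(t, k)
-- 		if k >= 0:
-- 			yield s[:k]+s[k+m:]
-- 			k = k+1
-- 		else:
-- 			still_looking = False
-- ===== SOURCE B (Python) =====
-- def find_candidates(s, t, m):
-- 	# Column-wise matching: keep a shrinking candidate set of start indices,
-- 	# filtered once per pattern position, then emit for the survivors.
-- 	cand = list(range(len(s) - len(t) + 1))
-- 	for j, c in enumerate(t):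
-- 		cand = [i for i in cand if s[i + j] == c]
-- 	for i in cand:
-- 		yield s[:i] + s[i + m:]
-- ===== Notes on version B (the rewrite author's own statement) =====
-- stated objective: alternative
-- what changed: A's single find-and-jump while loop (s.find(t, k), yield, k+1) is replaced by column-wise matching: B keeps a candidate set of start indices (initially range(len(s)-len(t)+1)) and narrows it once per pattern position j by the test s[i+j] == t[j], then a separate pass emits s[:i]+s[i+m:] for each surviving index.
import Mathlib
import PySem

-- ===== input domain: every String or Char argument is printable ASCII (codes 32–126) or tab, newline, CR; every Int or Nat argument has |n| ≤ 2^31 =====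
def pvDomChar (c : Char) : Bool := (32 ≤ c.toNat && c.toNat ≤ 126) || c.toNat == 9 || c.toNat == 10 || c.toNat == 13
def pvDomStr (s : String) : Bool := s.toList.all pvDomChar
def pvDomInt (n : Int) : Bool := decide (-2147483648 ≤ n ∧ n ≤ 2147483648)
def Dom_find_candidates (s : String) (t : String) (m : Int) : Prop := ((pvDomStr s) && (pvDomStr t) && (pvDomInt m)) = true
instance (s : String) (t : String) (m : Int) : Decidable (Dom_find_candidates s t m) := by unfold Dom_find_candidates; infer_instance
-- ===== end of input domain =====

-- B replaces A's find-and-jump scan by column-wise matching: a candidate set of start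
-- indices is narrowed once per pattern position, then a separate pass emits; objective:
-- alternative algorithm, same asymptotic cost. Both Pythons are generators; the
-- equivalence is about the list of yielded values.

-- ===== PORT A =====
-- s.find(t, k) past the end of s returns -1 (needed for the loop's termination measure).
theorem pvFindFrom_past (s t : List Char) (k : Nat) (h : s.length < k) :
    PySem.Chars.findFrom s t (k : Int) none = -1 := by
  have h0 : ¬ ((k : Int) < 0) := by omega
  have h1 : (s.length : Int) < (k : Int) := by omega
  simp only [PySem.Chars.findFrom]
  simp [h0, h1]

-- if s.find(t, k) ≥ 0 with k ≤ len s then k ≤ result ≤ len s (termination of A's loop)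
theorem pvFindFrom_bounds (s t : List Char) (k : Nat) (hk : k ≤ s.length)
    (h : 0 ≤ PySem.Chars.findFrom s t (k : Int) none) :
    (k : Int) ≤ PySem.Chars.findFrom s t (k : Int) none ∧
      PySem.Chars.findFrom s t (k : Int) none ≤ (s.length : Int) := by
  have hne : PySem.Chars.findFrom s t (k : Int) none ≠ -1 := by omega
  have h1 := (PySem.Chars.findFrom_natCast_spec s t k hk hne).1
  have h2 := PySem.Chars.findFrom_natCast s t k hk
  have h3 := PySem.Chars.find_le_length (List.drop k s) t
  constructor
  · exact h1
  · rw [h2] at h ⊢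
    split at h <;> simp_all
    omega

-- the while loop of A: k = s.find(t, k); if k >= 0: yield s[:k]+s[k+m:]; k = k+1; else stop
def pvLoopA (s t : List Char) (m : Int) (k : Nat) : List (List Char) :=
  let r := PySem.Chars.findFrom s t (k : Int) none
  if h : 0 ≤ r then
    (PySem.Chars.slice s none (some r) ++ PySem.Chars.slice s (some (r + m)) none)
      :: pvLoopA s t m (r.toNat + 1)
  else []
termination_by s.length + 1 - k
decreasing_by
  have h' : (0 : Int) ≤ PySem.Chars.findFrom s t (k : Int) none := h
  have hk : k ≤ s.length := by
    by_contra hgt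
    rw [pvFindFrom_past s t k (by omega)] at h'
    omega
  have := pvFindFrom_bounds s t k hk h'
  omega

def find_candidates (s : String) (t : String) (m : Int) : List String :=
  (pvLoopA s.toList t.toList m 0).map String.ofList

-- ===== PORT B =====
def find_candidates_alt (s : String) (t : String) (m : Int) : List String :=
  -- cand starts as list(range(len(s) - len(t) + 1)); then
  -- for j, c in enumerate(t): cand = [i for i in cand if s[i + j] == c];
  -- then for i in cand: yield s[:i] + s[i+m:]
  (((PySem.List.enumerate t.toList 0).foldl
      (fun cand jc => cand.filter (fun i => PySem.List.pyGet? s.toList (i + jc.1) == some jc.2))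
      (PySem.List.pyRange 0 ((s.toList.length : Int) - (t.toList.length : Int) + 1) 1))).map
    (fun i => String.ofList
      (PySem.Chars.slice s.toList none (some i) ++ PySem.Chars.slice s.toList (some (i + m)) none))

-- ===== PRECONDITION & SPEC =====
def Spec_find_candidates (s : String) (t : String) (m : Int) (out : List String) : Prop := out = find_candidates_alt s t m
instance (s : String) (t : String) (m : Int) (out : List String) : Decidable (Spec_find_candidates s t m out) := by unfold Spec_find_candidates; infer_instance

-- ===== CLAIM (what is proved, stated in full; the proofs are below) =====
def Claim_equal_find_candidates : Prop := ∀ (s : String) (t : String) (m : Int), Dom_find_candidates s t m → Spec_find_candidates s t m (find_candidates s t m)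

-- ===== LEMMAS AND PROOFS =====

-- A's filter test at a nonnegative index is exactly "t is a prefix of s dropped at i"
theorem pvTest_iff (cs ct : List Char) (j : Nat) :
    (PySem.Chars.slice cs (some (j : Int)) (some ((j : Int) + (ct.length : Int))) == ct) = true
      ↔ ct <+: cs.drop j := by
  simp only [PySem.Chars.slice]
  rw [PySem.List.slice_natCast_add, beq_iff_eq, List.prefix_iff_eq_take]
  exact eq_comm

-- a fold of filters is one filter by the conjunction of all the tests
theorem pvFoldFilter {α β : Type} (q : β → α → Bool) (ps : List β) (l : List α) :
    ps.foldl (fun acc p => acc.filter (q p)) l = l.filter (fun i => ps.all (fun p => q p i)) := by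
  induction ps generalizing l with
  | nil => simp
  | cons p ps ih =>
    simp only [List.foldl_cons, ih, List.filter_filter, List.all_cons]
    apply List.filter_congr
    intro a _
    rw [Bool.and_comm]

-- B's column-wise test at an in-range start index is the same prefix property
theorem pvColTest_iff (cs ct : List Char) (j : Nat) (hle : j + ct.length ≤ cs.length) :
    ((PySem.List.enumerate ct 0).all
        (fun jc => PySem.List.pyGet? cs ((j : Int) + jc.1) == some jc.2)) = true
      ↔ ct <+: cs.drop j := by
  rw [List.all_eq_true]
  constructor
  · intro h
    rw [List.prefix_iff_eq_take]
    apply List.ext_getElem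
    · simp; omega
    · intro k hk1 hk2
      have hmem : ((k : Int), ct[k]) ∈ PySem.List.enumerate ct 0 := by
        rw [PySem.List.mem_enumerate_iff]
        exact ⟨k, by simpa using hk1, by simp⟩
      have := h _ hmem
      simp only [beq_iff_eq] at this
      have hcast : (j : Int) + (k : Int) = ((j + k : Nat) : Int) := by push_cast; ring
      rw [hcast, PySem.List.pyGet?_natCast] at this
      have hjk : j + k < cs.length := by omega
      rw [List.getElem?_eq_getElem hjk] at this
      simp only [List.getElem_take, List.getElem_drop]
      simpa using this.symm
  · intro hp jc hmem
    rw [PySem.List.mem_enumerate_iff] at hmem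
    obtain ⟨k, hk, rfl⟩ := hmem
    have hcast : ((0 : Int) + (k : Int)) = ((k : Nat) : Int) := by ring
    simp only [hcast]
    have : (j : Int) + (k : Int) = ((j + k : Nat) : Int) := by push_cast; ring
    rw [this, PySem.List.pyGet?_natCast]
    obtain ⟨u, hu⟩ := hp
    have hd : cs[j + k]? = ct[k]? := by
      rw [← List.getElem?_drop, ← hu, List.getElem?_append_left hk]
    rw [hd, List.getElem?_eq_getElem hk]
    simp

-- main invariant: A's loop from k produces the emission pass over the matches ≥ k
theorem pvLoop_eq (s t : List Char) (m : Int) (k : Nat) :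
    pvLoopA s t m k =
      ((PySem.List.pyRange (k : Int) ((s.length : Int) - (t.length : Int) + 1) 1).filter
        (fun i => PySem.Chars.slice s (some i) (some (i + (t.length : Int))) == t)).map
        (fun i => PySem.Chars.slice s none (some i) ++ PySem.Chars.slice s (some (i + m)) none) := by
  by_cases hk : k ≤ s.length
  · rw [pvLoopA]
    by_cases h : 0 ≤ PySem.Chars.findFrom s t (k : Int) none
    · -- a match r was found: it is the first element the filter keeps from k on
      have hne : PySem.Chars.findFrom s t (k : Int) none ≠ -1 := by omega
      obtain ⟨hkr, hpre, hmin⟩ := PySem.Chars.findFrom_natCast_spec s t k hk hne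
      set r := PySem.Chars.findFrom s t (k : Int) none with hr
      have hbnd := pvFindFrom_bounds s t k hk h
      have hrn : (r.toNat : Int) = r := Int.toNat_of_nonneg h
      have hlen : t.length ≤ s.length - r.toNat := by
        have := hpre.length_le
        simpa using this
      have hrlt : r < (s.length : Int) - (t.length : Int) + 1 := by omega
      rw [dif_pos h,
        PySem.List.pyRange_one_append (k : Int) r _ hkr (by omega),
        PySem.List.pyRange_one_cons hrlt, List.filter_append]
      have hfilt1 :
          (PySem.List.pyRange (k : Int) r 1).filter
            (fun i => PySem.Chars.slice s (some i) (some (i + (t.length : Int))) == t) = [] := by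
        rw [List.filter_eq_nil_iff]
        intro i hi
        rw [PySem.List.mem_pyRange_one] at hi
        have hi0 : (i.toNat : Int) = i := Int.toNat_of_nonneg (by omega)
        rw [← hi0, pvTest_iff]
        exact hmin i.toNat (by omega) (by omega)
      have hr_match :
          (PySem.Chars.slice s (some r) (some (r + (t.length : Int))) == t) = true := by
        rw [← hrn, pvTest_iff]
        exact hpre
      rw [hfilt1, List.filter_cons, if_pos hr_match]
      simp only [List.nil_append, List.map_cons]
      rw [pvLoop_eq s t m (r.toNat + 1), show ((r.toNat + 1 : Nat) : Int) = r + 1 by omega]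
    · -- no match from k on: the loop stops and the filter keeps nothing
      have h2 := PySem.Chars.findFrom_natCast s t k hk
      have h3 := PySem.Chars.neg_one_le_find (List.drop k s) t
      have hneg : PySem.Chars.findFrom s t (k : Int) none = -1 := by
        by_cases hf : PySem.Chars.find (List.drop k s) t = -1
        · rw [h2, if_pos hf]
        · exfalso
          rw [h2, if_neg hf] at h
          omega
      have hnomatch : ¬ t <:+: List.drop k s :=
        (PySem.Chars.findFrom_natCast_eq_neg_one_iff s t k hk).mp hneg
      rw [dif_neg h]
      symm
      rw [List.map_eq_nil_iff, List.filter_eq_nil_iff]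
      intro i hi
      rw [PySem.List.mem_pyRange_one] at hi
      have hi0 : (i.toNat : Int) = i := Int.toNat_of_nonneg (by omega)
      rw [← hi0, pvTest_iff]
      intro hp
      have hsuf : List.drop i.toNat s <:+ List.drop k s := by
        have h5 := List.drop_suffix (i.toNat - k) (List.drop k s)
        rwa [List.drop_drop, show k + (i.toNat - k) = i.toNat from by omega] at h5
      exact hnomatch (hp.isInfix.trans hsuf.isInfix)
  · -- k past the end of s: find returns -1 and the range from k is already empty
    have hpast := pvFindFrom_past s t k (by omega)
    rw [pvLoopA, dif_neg (by rw [hpast]; norm_num),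
      PySem.List.pyRange_one_eq_nil (by omega)]
    simp
termination_by s.length + 1 - k
decreasing_by
  have := pvFindFrom_bounds s t k hk h
  omega

-- ===== VERDICT (by name: the statement is the Claim_ definition above) =====
theorem find_candidates_spec : Claim_equal_find_candidates := by
  intro s t m _
  unfold Spec_find_candidates find_candidates find_candidates_alt
  rw [pvLoop_eq, List.map_map, pvFoldFilter]
  simp only [Nat.cast_zero]
  congr 1
  apply List.filter_congr
  intro i hi
  rw [PySem.List.mem_pyRange_one] at hi
  have hi0 : (i.toNat : Int) = i := Int.toNat_of_nonneg (by omega)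
  have hle : i.toNat + t.toList.length ≤ s.toList.length := by omega
  rw [Bool.eq_iff_iff, ← hi0, pvColTest_iff _ _ _ hle, pvTest_iff]
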